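-- pv_equiv track=rewrite | github.com/wahhajjaved/large_language_maniacs | downloaded_data/ctssb/training/python-icat_905dd8c1bb4ab2373649afa24992fbf8ea6f09ac_after.py | _makesubst
-- ===== SOURCE A (Python) =====
-- substnames = {
--     "datafileFormat":"dff",
--     "dataset":"ds",
--     "dataset.investigation":"i",
--     "facility":"f",
--     "grouping":"g",
--     "instrumentScientists":"isc",
--     "investigation":"i",
--     "investigationGroups":"ig",
--     "investigationInstruments":"ii",
--     "investigationUsers":"iu",
--     "parameters":"p",
--     "parameters.type":"pt",
--     "type":"t",
--     "user":"u",
--     "userGroups":"ug",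
-- }
--
-- def _parents(obj):
--     """Iterate over the parents of obj as dot separated components.
--
--     >>> list(_parents("a.bb.c.ddd.e.ff"))
--     ['a', 'a.bb', 'a.bb.c', 'a.bb.c.ddd', 'a.bb.c.ddd.e']
--     >>> list(_parents("abc"))
--     []
--     """
--     s = 0
--     while True:
--         i = obj.find('.', s)
--         if i < 0:
--             break
--         yield obj[:i]
--         s = i+1
--
-- def _makesubst(objs):
--     subst = {}
--     substcount = 0
--     for obj in sorted(objs):
--         for o in _parents(obj):
--             if o not in subst:
--                 if o in substnames and substnames[o] not in subst.values():
--                     subst[o] = substnames[o]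
--                 else:
--                     substcount += 1
--                     subst[o] = "s%d" % substcount
--     return subst
-- ===== SOURCE B (Python) =====
-- substnames = {
--     "datafileFormat":"dff",
--     "dataset":"ds",
--     "dataset.investigation":"i",
--     "facility":"f",
--     "grouping":"g",
--     "instrumentScientists":"isc",
--     "investigation":"i",
--     "investigationGroups":"ig",
--     "investigationInstruments":"ii",
--     "investigationUsers":"iu",
--     "parameters":"p",
--     "parameters.type":"pt",
--     "type":"t",
--     "user":"u",
--     "userGroups":"ug",
-- }
--
-- def _prefixes_at_dots(obj):
--     """All proper dot-separated parent paths of obj, left to right."""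
--     res = []
--     pref = []
--     for ch in obj:
--         if ch == '.':
--             res.append(''.join(pref))
--         pref.append(ch)
--     return res
--
-- def _makesubst(objs):
--     # Pass 1: distinct parent paths in first-occurrence order over sorted(objs).
--     seen = set()
--     order = []
--     for obj in sorted(objs):
--         for o in _prefixes_at_dots(obj):
--             if o not in seen:
--                 seen.add(o)
--                 order.append(o)
--     # Pass 2: assign each path its name.
--     subst = {}
--     used = set()
--     count = 0
--     for o in order:
--         if o in substnames and substnames[o] not in used:
--             name = substnames[o]
--         else:
--             count += 1
--             name = "s%d" % count
--         subst[o] = name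
--         used.add(name)
--     return subst
-- ===== Notes on version B (the rewrite author's own statement) =====
-- stated objective: alternative
-- what changed: B splits A's fused loop into two passes: a discovery pass that collects the distinct parent paths in first-occurrence order over sorted(objs) (with a seen-set, and prefixes enumerated by a single character scan instead of A's repeated str.find loop), then an assignment pass that names each path while maintaining a used-names set and a counter, instead of A's rescan of subst.values() at every new path.
import Mathlib
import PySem

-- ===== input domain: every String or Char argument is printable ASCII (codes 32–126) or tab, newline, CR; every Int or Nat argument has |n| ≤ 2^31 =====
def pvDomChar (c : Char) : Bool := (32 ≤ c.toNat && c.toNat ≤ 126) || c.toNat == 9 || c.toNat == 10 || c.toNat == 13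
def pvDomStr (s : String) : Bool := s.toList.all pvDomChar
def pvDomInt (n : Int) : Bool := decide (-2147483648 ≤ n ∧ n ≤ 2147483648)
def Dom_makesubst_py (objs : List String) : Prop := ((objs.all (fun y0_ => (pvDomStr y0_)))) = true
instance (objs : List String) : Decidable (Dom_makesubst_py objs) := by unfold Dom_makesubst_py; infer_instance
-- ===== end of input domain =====

-- B replaces A's fused discover-and-name loop by two passes (discovery of the distinct
-- parent paths, then name assignment with a used-names set); equivalence of the two is proved.

-- ===== PORT A =====

-- module constant `substnames`
def pvSubstnames : PySem.Dict String String :=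
  PySem.Dict.ofList [
    ("datafileFormat","dff"), ("dataset","ds"), ("dataset.investigation","i"),
    ("facility","f"), ("grouping","g"), ("instrumentScientists","isc"),
    ("investigation","i"), ("investigationGroups","ig"), ("investigationInstruments","ii"),
    ("investigationUsers","iu"), ("parameters","p"), ("parameters.type","pt"),
    ("type","t"), ("user","u"), ("userGroups","ug")]

-- A's `_parents` generator: s = 0; while True: i = obj.find('.', s); if i < 0: break;
-- yield obj[:i]; s = i+1.  The while-loop is ported with a fuel counter (length+1 bounds
-- the number of '.'-occurrences, hence the iterations); obj[:i] with 0 ≤ i is `take i`.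
def pvParentsA_go (cs : List Char) (s : Nat) : Nat → List String
  | 0 => []
  | fuel+1 =>
    let i := PySem.Chars.findFrom cs ['.'] (s : Int) none
    if i < 0 then []
    else String.mk (cs.take i.toNat) :: pvParentsA_go cs (i.toNat + 1) fuel

def pvParentsA (obj : String) : List String :=
  pvParentsA_go obj.toList 0 (obj.toList.length + 1)

-- the body of A's inner loop over `o`
def pvStepA (st : PySem.Dict String String × Int) (o : String) :
    PySem.Dict String String × Int :=
  if st.1.contains o then st
  else if pvSubstnames.contains o
          && !((st.1.values).contains (pvSubstnames.getD o "")) then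
    (st.1.insert o (pvSubstnames.getD o ""), st.2)
  else
    (st.1.insert o ("s" ++ PySem.Int.toStr (st.2 + 1)), st.2 + 1)

def makesubst_py (objs : List String) : List (String × String) :=
  ((PySem.List.sorted objs (fun x => x) false).foldl
    (fun st obj => (pvParentsA obj).foldl pvStepA st)
    (PySem.Dict.empty, (0 : Int))).1.items

-- ===== PORT B =====

-- B's `_prefixes_at_dots`: one scan over the characters, state (res, pref);
-- ''.join(pref) with pref a list of single characters is `String.mk pref`.
def pvPrefixesAtDots (obj : String) : List String :=
  (obj.toList.foldl
    (fun (st : List String × List Char) ch =>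
      ((if ch = '.' then st.1 ++ [String.mk st.2] else st.1), st.2 ++ [ch]))
    ([], [])).1

-- B's discovery pass body: if o not in seen: seen.add(o); order.append(o)
def pvDiscStep (st : PySem.Set String × List String) (o : String) :
    PySem.Set String × List String :=
  if PySem.Set.contains st.1 o then st
  else (PySem.Set.add st.1 o, st.2 ++ [o])

-- B's assignment pass body, state (subst, used, count)
def pvAssignStep (st : PySem.Dict String String × PySem.Set String × Int) (o : String) :
    PySem.Dict String String × PySem.Set String × Int :=
  let nc :=
    if pvSubstnames.contains o
       && !(PySem.Set.contains st.2.1 (pvSubstnames.getD o "")) then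
      (pvSubstnames.getD o "", st.2.2)
    else ("s" ++ PySem.Int.toStr (st.2.2 + 1), st.2.2 + 1)
  (st.1.insert o nc.1, PySem.Set.add st.2.1 nc.1, nc.2)

def makesubst_py_alt (objs : List String) : List (String × String) :=
  let disc := (PySem.List.sorted objs (fun x => x) false).foldl
    (fun st obj => (pvPrefixesAtDots obj).foldl pvDiscStep st)
    (PySem.Set.empty, ([] : List String))
  ((disc.2.foldl pvAssignStep
      (PySem.Dict.empty, PySem.Set.empty, (0 : Int))).1).items

-- ===== PRECONDITION & SPEC =====
def Spec_makesubst_py (objs : List String) (out : List (String × String)) : Prop := out = makesubst_py_alt objs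
instance (objs : List String) (out : List (String × String)) : Decidable (Spec_makesubst_py objs out) := by unfold Spec_makesubst_py; infer_instance

-- ===== CLAIM (what is proved, stated in full; the proofs are below) =====
def Claim_equal_makesubst_py : Prop := ∀ (objs : List String), Dom_makesubst_py objs → Spec_makesubst_py objs (makesubst_py objs)

-- ===== LEMMAS AND PROOFS =====

-- reference form of the parent-prefix list of a character list
def pvSpec : List Char → List (List Char)
  | [] => []
  | c :: cs => (if c = '.' then [[]] else []) ++ (pvSpec cs).map (c :: ·)

lemma pvPrefixes_go (cs : List Char) :
    ∀ (res : List String) (pref : List Char),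
      (cs.foldl (fun (st : List String × List Char) ch =>
          ((if ch = '.' then st.1 ++ [String.mk st.2] else st.1), st.2 ++ [ch]))
        (res, pref)).1
      = res ++ (pvSpec cs).map (fun t => String.mk (pref ++ t)) := by
  induction cs with
  | nil => intro res pref; simp [pvSpec]
  | cons c cs ih =>
    intro res pref
    by_cases hc : c = '.' <;>
      simp [pvSpec, hc, List.foldl_cons, ih, Function.comp_def]

lemma pvPrefixesAtDots_eq (obj : String) :
    pvPrefixesAtDots obj = (pvSpec obj.toList).map String.mk := by
  simp [pvPrefixesAtDots, pvPrefixes_go]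

lemma pvSpec_no_dot (cs : List Char) (h : '.' ∉ cs) : pvSpec cs = [] := by
  induction cs with
  | nil => rfl
  | cons c cs ih =>
    simp only [List.mem_cons, not_or] at h
    simp [pvSpec, Ne.symm h.1, ih h.2]

lemma pvSpec_first_dot (j : Nat) : ∀ (cs : List Char),
    (∀ k (hk : k < j) (hk' : k < cs.length), cs[k] ≠ '.') →
    ∀ (hj : j < cs.length), cs[j] = '.' →
    pvSpec cs = cs.take j :: (pvSpec (cs.drop (j+1))).map (fun t => cs.take j ++ '.' :: t) := by
  induction j with
  | zero =>
    intro cs _ hj hdot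
    match cs, hj with
    | c :: cs, _ =>
      simp at hdot
      simp [pvSpec, hdot]
  | succ j ih =>
    intro cs hbefore hj hdot
    match cs, hj with
    | c :: cs, hj =>
      have hc : c ≠ '.' := by
        have := hbefore 0 (Nat.succ_pos _) (by simp)
        simpa using this
      have hj' : j < cs.length := by simpa using hj
      have hdot' : cs[j] = '.' := by simpa using hdot
      have hb' : ∀ k (_ : k < j) (hk' : k < cs.length), cs[k] ≠ '.' := by
        intro k hk hk'
        have := hbefore (k+1) (by omega) (by simpa using Nat.succ_lt_succ hk')
        simpa using this
      simp only [pvSpec, if_neg hc, List.nil_append, ih cs hb' hj' hdot']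
      simp [Function.comp_def]

-- single-character infix is membership
lemma pvSingleton_infix_iff (c : Char) (cs : List Char) : [c] <:+: cs ↔ c ∈ cs := by
  constructor
  · rintro ⟨s, t, rfl⟩; simp
  · intro h
    obtain ⟨l, r, rfl⟩ := List.append_of_mem h
    exact ⟨l, r, by simp⟩

lemma pvParentsA_go_eq (cs : List Char) : ∀ (fuel s : Nat),
    s ≤ cs.length → (cs.drop s).count '.' < fuel →
    pvParentsA_go cs s fuel
      = (pvSpec (cs.drop s)).map (fun t => String.mk (cs.take s ++ t)) := by
  intro fuel
  induction fuel with
  | zero => intro s _ h; omega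
  | succ fuel ih =>
    intro s hs hcount
    rw [pvParentsA_go]
    have hfind := PySem.Chars.findFrom_natCast cs ['.'] s hs
    by_cases hocc : '.' ∈ cs.drop s
    · -- a dot is found
      have hne : PySem.Chars.find (cs.drop s) ['.'] ≠ -1 := by
        rw [PySem.Chars.find_ne_neg_one_iff, pvSingleton_infix_iff]; exact hocc
      have hnn : 0 ≤ PySem.Chars.find (cs.drop s) ['.'] := by
        rw [PySem.Chars.find_nonneg_iff, pvSingleton_infix_iff]; exact hocc
      set f := PySem.Chars.find (cs.drop s) ['.'] with hf
      have hspec := PySem.Chars.find_spec (s := cs.drop s) (sub := ['.']) hnn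
      set j := f.toNat with hjdef
      have hjlen : j < (cs.drop s).length := by
        have hpre := hspec.1
        rcases hpre with ⟨t, ht⟩
        by_contra hge
        have : (cs.drop s).drop j = [] := List.drop_eq_nil_of_le (by omega)
        rw [this] at ht
        simp at ht
      have hdotj : (cs.drop s)[j] = '.' := by
        rcases hspec.1 with ⟨t, ht⟩
        have h2 : (cs.drop s).drop j = '.' :: t := by simpa using ht.symm
        have h3 : (cs.drop s)[j]? = some '.' := by
          rw [← List.head?_drop, h2]; rfl
        rw [List.getElem?_eq_getElem hjlen] at h3
        simpa using h3
      have hbefore : ∀ k (hk : k < j) (hk' : k < (cs.drop s).length), (cs.drop s)[k] ≠ '.' := by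
        intro k hk hk' hcontra
        have := hspec.2 k hk
        apply this
        exact ⟨(cs.drop s).drop (k+1), by
          have h4 := List.getElem_cons_drop (as := cs.drop s) hk'
          rw [hcontra] at h4
          simpa using h4⟩
      -- findFrom returns s + f
      rw [hfind, if_neg hne]
      have hilt : ¬ ((s : Int) + f < 0) := by omega
      rw [if_neg hilt]
      have hitoNat : ((s : Int) + f).toNat = s + j := by omega
      rw [hitoNat]
      -- rewrite pvSpec of drop s at the first dot
      rw [pvSpec_first_dot j (cs.drop s) hbefore hjlen hdotj]
      have hsj : s + j ≤ cs.length := by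
        have := hjlen; simp [List.length_drop] at this; omega
      have hsj1 : s + j + 1 ≤ cs.length := by
        have := hjlen; simp [List.length_drop] at this; omega
      have hdrop : (cs.drop s).drop (j+1) = cs.drop (s + j + 1) := by
        rw [List.drop_drop]; ring_nf
      have htake : (cs.drop s).take j = (cs.take (s+j)).drop s := by
        rw [List.drop_take]; congr 1; omega
      have htakefull : cs.take s ++ (cs.drop s).take j = cs.take (s+j) := by
        rw [htake]
        have : cs.take s = (cs.take (s+j)).take s := by
          rw [List.take_take]; congr 1; omega
        rw [this, List.take_append_drop]
      have hdotcs : cs[s+j]'(by omega) = '.' := by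
        have := hdotj
        rwa [List.getElem_drop] at this
      have htake1 : cs.take (s+j+1) = cs.take (s+j) ++ ['.'] := by
        have := List.take_succ (l := cs) (i := s+j)
        rw [this]
        simp [List.getElem?_eq_getElem (by omega : s+j < cs.length), hdotcs]
      have hcount' : (cs.drop (s+j+1)).count '.' < fuel := by
        have hsplit : cs.drop s = (cs.drop s).take j ++ '.' :: ((cs.drop s).drop (j+1)) := by
          have h1 := List.getElem_cons_drop (as := cs.drop s) hjlen
          rw [hdotj] at h1
          rw [h1, List.take_append_drop]
        have hnodot : ((cs.drop s).take j).count '.' = 0 := by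
          rw [List.count_eq_zero]
          intro hmem
          obtain ⟨k, hk, hkeq⟩ := List.mem_iff_getElem.mp hmem
          have hkj : k < j := by simp [List.length_take] at hk; omega
          have hklen : k < (cs.drop s).length := by omega
          have : (cs.drop s)[k] = '.' := by
            rw [← hkeq]; simp [List.getElem_take]
          exact hbefore k hkj hklen this
        have : (cs.drop s).count '.' = ((cs.drop s).drop (j+1)).count '.' + 1 := by
          conv_lhs => rw [hsplit]
          simp [List.count_append, hnodot]
        rw [← hdrop]
        omega
      rw [ih (s + j + 1) hsj1 hcount']
      congr 1
      · congr 1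
        exact htakefull.symm
      · rw [List.map_map]
        congr 1
        · funext t
          simp only [Function.comp_def, htake1]
          rw [← htakefull, List.append_assoc]
          simp
        · rw [hdrop]
    · -- no dot: findFrom = -1, loop ends; pvSpec of the rest is []
      have heq : PySem.Chars.find (cs.drop s) ['.'] = -1 := by
        rw [PySem.Chars.find_eq_neg_one_iff, pvSingleton_infix_iff]; exact hocc
      rw [hfind, if_pos heq, if_pos (by norm_num), pvSpec_no_dot _ hocc]
      simp

lemma pvParentsA_eq (obj : String) :
    pvParentsA obj = (pvSpec obj.toList).map String.mk := by
  rw [pvParentsA, pvParentsA_go_eq obj.toList (obj.toList.length + 1) 0 (by omega)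
        (by simpa using Nat.lt_succ_of_le (List.count_le_length (l := obj.toList) (a := '.')))]
  simp

lemma pvParents_agree (obj : String) : pvParentsA obj = pvPrefixesAtDots obj := by
  rw [pvParentsA_eq, pvPrefixesAtDots_eq]

-- nested foldl over per-object lists = foldl over the flattened list
lemma pvFoldl_flat {α β σ : Type} (xs : List α) (g : α → List β) (f : σ → β → σ) :
    ∀ (init : σ),
      xs.foldl (fun st x => (g x).foldl f st) init = (xs.flatMap g).foldl f init := by
  induction xs with
  | nil => intro init; simp
  | cons x xs ih => intro init; simp [List.flatMap_cons, List.foldl_append, ih]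

-- the list of paths the discovery pass appends, given the paths already seen
def pvNewOf (seen : PySem.Set String) : List String → List String
  | [] => []
  | o :: L =>
    if PySem.Set.contains seen o then pvNewOf seen L
    else o :: pvNewOf (PySem.Set.add seen o) L

lemma pvDisc_eq (L : List String) :
    ∀ (seen : PySem.Set String) (acc : List String),
      (L.foldl pvDiscStep (seen, acc)).2 = acc ++ pvNewOf seen L := by
  induction L with
  | nil => intro seen acc; simp [pvNewOf]
  | cons o L ih =>
    intro seen acc
    by_cases h : o ∈ seen <;>
      simp [pvDiscStep, pvNewOf, h, ih]

-- the heart of the equivalence: A's fused loop over a flat stream of parent paths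
-- equals B's assignment pass over the stream's new (unseen) paths, under the
-- invariants seen = keys(subst) and used = values(subst) (as membership tests)
lemma pvInsert_contains (d : PySem.Dict String String) (o v x : String)
    (h : d.contains o = false) :
    (d.insert o v).contains x = (d.contains x || (o == x)) := by
  simp only [PySem.Dict.contains] at h
  simp [PySem.Dict.insert, PySem.Dict.contains, h, List.any_append]

lemma pvAdd_contains (s : PySem.Set String) (o x : String)
    (h : PySem.Set.contains s o = false) :
    PySem.Set.contains (PySem.Set.add s o) x
      = (PySem.Set.contains s x || (x == o)) := by
  have h' : o ∉ s := by simpa [PySem.Set.contains] using h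
  rw [Bool.eq_iff_iff]
  simp [PySem.Set.add, PySem.Set.contains, h', List.mem_append]

lemma pvInsert_values (d : PySem.Dict String String) (o v : String)
    (h : d.contains o = false) :
    (d.insert o v).values = d.values ++ [v] := by
  simp [PySem.Dict.insert, PySem.Dict.values, h]

lemma pvNewOf_cons (seen : PySem.Set String) (o : String) (L : List String) :
    pvNewOf seen (o :: L)
      = if PySem.Set.contains seen o then pvNewOf seen L
        else o :: pvNewOf (PySem.Set.add seen o) L := rfl

lemma pvMain (L : List String) :
    ∀ (subst : PySem.Dict String String) (count : Int)
      (seen used : PySem.Set String),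
      (∀ o, subst.contains o = PySem.Set.contains seen o) →
      (∀ v, (subst.values).contains v = PySem.Set.contains used v) →
      L.foldl pvStepA (subst, count)
        = (fun t => (t.1, t.2.2)) ((pvNewOf seen L).foldl pvAssignStep (subst, used, count)) := by
  induction L with
  | nil => intro subst count seen used _ _; simp [pvNewOf]
  | cons o L ih =>
    intro subst count seen used hseen hused
    rw [List.foldl_cons, pvNewOf_cons, pvStepA]
    by_cases hmem : subst.contains o = true
    · -- already assigned: both passes skip o
      have hseeno : PySem.Set.contains seen o = true := by rw [← hseen]; exact hmem
      rw [if_pos hmem, if_pos hseeno]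
      exact ih subst count seen used hseen hused
    · -- new path: both assign the same name
      have hmem' : subst.contains o = false := by simpa using hmem
      have hseeno : PySem.Set.contains seen o = false := by rw [← hseen]; exact hmem'
      have hseeno' : ¬ (PySem.Set.contains seen o = true) := by rw [hseeno]; simp
      rw [if_neg hmem, if_neg hseeno', List.foldl_cons, pvAssignStep]
      -- re-establishing the invariants after inserting a fresh key o with value v
      have hseen' : ∀ (v x : String),
          (subst.insert o v).contains x = PySem.Set.contains (PySem.Set.add seen o) x := by
        intro v x
        rw [pvInsert_contains subst o v x hmem', pvAdd_contains seen o x hseeno,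
            hseen x]
        by_cases hxo : o = x
        · subst hxo; rfl
        · have h1 : (o == x) = false := by simp [hxo]
          have h2 : (x == o) = false := by simp [Ne.symm hxo]
          rw [h1, h2]
      have hused' : ∀ (v x : String),
          ((subst.insert o v).values).contains x
            = PySem.Set.contains (PySem.Set.add used v) x := by
        intro v x
        rw [pvInsert_values subst o v hmem']
        have hmemiff : ∀ y : String, y ∈ subst.values ↔ y ∈ used := by
          intro y
          have h := hused y
          rw [Bool.eq_iff_iff] at h
          constructor <;> intro hy
          · have hc : (subst.values).contains y = true := by simpa using hy
            rw [h] at hc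
            simpa [PySem.Set.contains] using hc
          · have hc : PySem.Set.contains used y = true := by
              simpa [PySem.Set.contains] using hy
            rw [← h] at hc
            simpa using hc
        rw [Bool.eq_iff_iff]
        simp [PySem.Set.contains, PySem.Set.mem_add, hmemiff x, List.mem_append]
      -- the two branch conditions agree, by the used-invariant
      have hbL : (pvSubstnames.contains o
            && !((subst.values).contains (pvSubstnames.getD o "")))
          = (pvSubstnames.contains o
            && !(PySem.Set.contains used (pvSubstnames.getD o ""))) := by
        rw [hused]
      simp only [hbL]
      by_cases hbranch : (pvSubstnames.contains o
          && !(PySem.Set.contains used (pvSubstnames.getD o ""))) = true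
      · simp only [if_pos hbranch]
        exact ih _ _ _ _ (hseen' _) (hused' _)
      · simp only [if_neg hbranch]
        exact ih _ _ _ _ (hseen' _) (hused' _)

-- empty-state invariants
lemma pvEmpty_seen : ∀ o : String,
    (PySem.Dict.empty : PySem.Dict String String).contains o
      = PySem.Set.contains PySem.Set.empty o := by
  intro o; rfl

lemma pvEmpty_used : ∀ v : String,
    ((PySem.Dict.empty : PySem.Dict String String).values).contains v
      = PySem.Set.contains PySem.Set.empty v := by
  intro v; rfl

-- ===== VERDICT (by name: the statement is the Claim_ definition above) =====
theorem makesubst_py_spec : Claim_equal_makesubst_py := by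
  intro objs _
  unfold Spec_makesubst_py makesubst_py makesubst_py_alt
  have hpar : ∀ obj, pvParentsA obj = pvPrefixesAtDots obj := pvParents_agree
  simp only [hpar]
  rw [pvFoldl_flat _ pvPrefixesAtDots pvStepA,
      pvFoldl_flat _ pvPrefixesAtDots pvDiscStep]
  set L := (PySem.List.sorted objs (fun x => x) false).flatMap pvPrefixesAtDots with hL
  rw [pvDisc_eq L PySem.Set.empty []]
  rw [pvMain L PySem.Dict.empty 0 PySem.Set.empty PySem.Set.empty pvEmpty_seen pvEmpty_used]
  simp
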